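-- pv_equiv track=rewrite | github.com/dojo-modeling/dojo | annotate/annotation/associations.py | one_primary
-- ===== SOURCE A (Python) =====
-- def one_primary(annotations):
--     primary_time_exists = False
--     primary_country_exists = False
--     primary_admin1_exists = False
--     primary_admin2_exists = False
--     primary_admin3_exists = False
--     primary_coord_exists = False
--
--     for x in annotations.keys():
--         if "primary_time" in annotations[x]:
--             primary_time_exists = True
--
--         if "primary_geo" in annotations[x] and "Geo" in annotations[x]:
--             if annotations[x]["Geo"] in ["Country", "ISO2", "ISO3"]:
--                 primary_country_exists = True
--             elif annotations[x]["Geo"] == "State/Territory":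
--                 primary_admin1_exists = True
--             elif annotations[x]["Geo"] == "County/District":
--                 primary_admin2_exists = True
--             elif annotations[x]["Geo"] == "Municipality/Town":
--                 primary_admin3_exists = True
--             elif annotations[x]["Geo"] in ["Latitude", "Longitude", "Coordinates"]:
--                 primary_coord_exists = True
--
--     return (
--         primary_time_exists,
--         primary_country_exists,
--         primary_admin1_exists,
--         primary_admin2_exists,
--         primary_admin3_exists,
--         primary_coord_exists,
--     )
-- ===== SOURCE B (Python) =====
-- def one_primary(annotations):
--     vals = list(annotations.values())
--     return (
--         any("primary_time" in a for a in vals),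
--         any("primary_geo" in a and a.get("Geo") in ("Country", "ISO2", "ISO3") for a in vals),
--         any("primary_geo" in a and a.get("Geo") == "State/Territory" for a in vals),
--         any("primary_geo" in a and a.get("Geo") == "County/District" for a in vals),
--         any("primary_geo" in a and a.get("Geo") == "Municipality/Town" for a in vals),
--         any("primary_geo" in a and a.get("Geo") in ("Latitude", "Longitude", "Coordinates") for a in vals),
--     )
-- ===== Notes on version B (the rewrite author's own statement) =====
-- stated objective: idiomatic
-- what changed: Replaces the single accumulate pass with six boolean flags and an if/elif branch ladder by six independent any() scans over annotations.values(), each a self-contained predicate.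
import Mathlib
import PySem

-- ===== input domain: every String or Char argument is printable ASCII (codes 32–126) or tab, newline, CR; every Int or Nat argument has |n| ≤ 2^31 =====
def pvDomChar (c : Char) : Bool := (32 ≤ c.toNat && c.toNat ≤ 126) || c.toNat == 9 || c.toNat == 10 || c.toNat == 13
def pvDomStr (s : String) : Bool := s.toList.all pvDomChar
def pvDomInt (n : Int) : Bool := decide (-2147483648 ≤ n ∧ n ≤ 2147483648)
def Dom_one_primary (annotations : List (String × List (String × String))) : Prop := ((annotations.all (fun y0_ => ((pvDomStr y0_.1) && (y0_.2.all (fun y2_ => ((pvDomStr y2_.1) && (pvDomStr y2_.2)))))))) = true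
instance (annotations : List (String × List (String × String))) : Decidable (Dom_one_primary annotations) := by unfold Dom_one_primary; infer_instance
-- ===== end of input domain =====

-- B re-implements the single accumulate-loop-with-branch-ladder as six independent any-scans (idiomatic; same cost).

-- ===== PORT A =====
-- one loop over the dict's keys, maintaining six boolean flags, branch ladder on the "Geo" value
def one_primary_step (s : Bool × Bool × Bool × Bool × Bool × Bool)
    (ann : PySem.Dict String String) : Bool × Bool × Bool × Bool × Bool × Bool :=
  let s1 := if ann.contains "primary_time" then true else s.1
  if ann.contains "primary_geo" && ann.contains "Geo" then
    match ann.get? "Geo" with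
    | some g =>
      if g = "Country" ∨ g = "ISO2" ∨ g = "ISO3" then (s1, true, s.2.2.1, s.2.2.2.1, s.2.2.2.2.1, s.2.2.2.2.2)
      else if g = "State/Territory" then (s1, s.2.1, true, s.2.2.2.1, s.2.2.2.2.1, s.2.2.2.2.2)
      else if g = "County/District" then (s1, s.2.1, s.2.2.1, true, s.2.2.2.2.1, s.2.2.2.2.2)
      else if g = "Municipality/Town" then (s1, s.2.1, s.2.2.1, s.2.2.2.1, true, s.2.2.2.2.2)
      else if g = "Latitude" ∨ g = "Longitude" ∨ g = "Coordinates" then (s1, s.2.1, s.2.2.1, s.2.2.2.1, s.2.2.2.2.1, true)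
      else (s1, s.2.1, s.2.2.1, s.2.2.2.1, s.2.2.2.2.1, s.2.2.2.2.2)
    | none => (s1, s.2.1, s.2.2.1, s.2.2.2.1, s.2.2.2.2.1, s.2.2.2.2.2)  -- unreachable: guarded by contains "Geo"
  else (s1, s.2.1, s.2.2.1, s.2.2.2.1, s.2.2.2.2.1, s.2.2.2.2.2)

def one_primary (annotations : List (String × List (String × String))) : Bool × Bool × Bool × Bool × Bool × Bool :=
  let d := PySem.Dict.ofList annotations
  d.keys.foldl (fun s x => one_primary_step s (PySem.Dict.ofList (d.getD x []))) (false, false, false, false, false, false)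

-- ===== PORT B =====
-- six independent any-scans over the dict's values
def one_primary_alt (annotations : List (String × List (String × String))) : Bool × Bool × Bool × Bool × Bool × Bool :=
  let vals := (PySem.Dict.ofList annotations).values
  ( vals.any (fun a => (PySem.Dict.ofList a).contains "primary_time"),
    vals.any (fun a => (PySem.Dict.ofList a).contains "primary_geo" &&
      ((PySem.Dict.ofList a).get? "Geo" == some "Country" || (PySem.Dict.ofList a).get? "Geo" == some "ISO2" || (PySem.Dict.ofList a).get? "Geo" == some "ISO3")),
    vals.any (fun a => (PySem.Dict.ofList a).contains "primary_geo" && ((PySem.Dict.ofList a).get? "Geo" == some "State/Territory")),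
    vals.any (fun a => (PySem.Dict.ofList a).contains "primary_geo" && ((PySem.Dict.ofList a).get? "Geo" == some "County/District")),
    vals.any (fun a => (PySem.Dict.ofList a).contains "primary_geo" && ((PySem.Dict.ofList a).get? "Geo" == some "Municipality/Town")),
    vals.any (fun a => (PySem.Dict.ofList a).contains "primary_geo" &&
      ((PySem.Dict.ofList a).get? "Geo" == some "Latitude" || (PySem.Dict.ofList a).get? "Geo" == some "Longitude" || (PySem.Dict.ofList a).get? "Geo" == some "Coordinates")) )

-- ===== PRECONDITION & SPEC =====
def Spec_one_primary (annotations : List (String × List (String × String))) (out : Bool × Bool × Bool × Bool × Bool × Bool) : Prop := out = one_primary_alt annotations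
instance (annotations : List (String × List (String × String))) (out : Bool × Bool × Bool × Bool × Bool × Bool) : Decidable (Spec_one_primary annotations out) := by unfold Spec_one_primary; infer_instance

-- ===== CLAIM (what is proved, stated in full; the proofs are below) =====
def Claim_equal_one_primary : Prop := ∀ (annotations : List (String × List (String × String))), Dom_one_primary annotations → Spec_one_primary annotations (one_primary annotations)

-- ===== LEMMAS AND PROOFS =====

-- B's six per-value predicates
def pvq1 (a : List (String × String)) : Bool := (PySem.Dict.ofList a).contains "primary_time"
def pvgeo (a : List (String × String)) (g : String) : Bool :=
  (PySem.Dict.ofList a).contains "primary_geo" && ((PySem.Dict.ofList a).get? "Geo" == some g)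
def pvq2 (a : List (String × String)) : Bool := (PySem.Dict.ofList a).contains "primary_geo" &&
  ((PySem.Dict.ofList a).get? "Geo" == some "Country" || (PySem.Dict.ofList a).get? "Geo" == some "ISO2" || (PySem.Dict.ofList a).get? "Geo" == some "ISO3")
def pvq6 (a : List (String × String)) : Bool := (PySem.Dict.ofList a).contains "primary_geo" &&
  ((PySem.Dict.ofList a).get? "Geo" == some "Latitude" || (PySem.Dict.ofList a).get? "Geo" == some "Longitude" || (PySem.Dict.ofList a).get? "Geo" == some "Coordinates")

lemma one_primary_step_eq (s : Bool × Bool × Bool × Bool × Bool × Bool) (a : List (String × String)) :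
    one_primary_step s (PySem.Dict.ofList a) =
      (s.1 || pvq1 a, s.2.1 || pvq2 a, s.2.2.1 || pvgeo a "State/Territory",
       s.2.2.2.1 || pvgeo a "County/District", s.2.2.2.2.1 || pvgeo a "Municipality/Town",
       s.2.2.2.2.2 || pvq6 a) := by
  obtain ⟨s1, s2, s3, s4, s5, s6⟩ := s
  unfold one_primary_step pvq1 pvq2 pvq6 pvgeo
  rcases hg : (PySem.Dict.ofList a).get? "Geo" with _ | g
  · have hc : (PySem.Dict.ofList a).contains "Geo" = false := by
      rw [PySem.Dict.contains_eq_isSome_get?, hg]; rfl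
    simp only [hc, Bool.and_false]
    cases s1 <;> simp
  · have hc : (PySem.Dict.ofList a).contains "Geo" = true := by
      rw [PySem.Dict.contains_eq_isSome_get?, hg]; rfl
    simp only [hc, Bool.and_true]
    cases hpt : (PySem.Dict.ofList a).contains "primary_time" <;>
      cases hpg : (PySem.Dict.ofList a).contains "primary_geo" <;>
        simp [hpt, hpg] <;>
    first
      | done
      | (split_ifs with h1 h2 h3 h4 h5
         · rcases h1 with rfl | rfl | rfl <;> simp
         · subst h2; simp
         · subst h3; simp
         · subst h4; simp
         · rcases h5 with rfl | rfl | rfl <;> simp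
         · simp_all)

lemma fold6 (L : List (List (String × String))) (s1 s2 s3 s4 s5 s6 : Bool) :
    L.foldl (fun s a => one_primary_step s (PySem.Dict.ofList a)) (s1, s2, s3, s4, s5, s6) =
      (s1 || L.any pvq1, s2 || L.any pvq2, s3 || L.any (pvgeo · "State/Territory"),
       s4 || L.any (pvgeo · "County/District"), s5 || L.any (pvgeo · "Municipality/Town"),
       s6 || L.any pvq6) := by
  induction L generalizing s1 s2 s3 s4 s5 s6 with
  | nil => simp
  | cons a t ih =>
    simp only [List.foldl_cons]
    rw [one_primary_step_eq, ih]
    simp [List.any_cons, Bool.or_assoc]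

theorem one_primary_spec : Claim_equal_one_primary := by
  intro annotations _
  unfold Spec_one_primary one_primary one_primary_alt
  have hnd : (PySem.Dict.ofList annotations).keys.Nodup := PySem.Dict.nodup_keys_ofList annotations
  set d := PySem.Dict.ofList annotations with hd
  have hkeys : d.keys = d.items.map (·.1) := rfl
  have hvals : d.values = d.items.map (·.2) := rfl
  have h1 : d.keys.foldl (fun s x => one_primary_step s (PySem.Dict.ofList (d.getD x []))) (false, false, false, false, false, false)
      = d.items.foldl (fun s p => one_primary_step s (PySem.Dict.ofList p.2)) (false, false, false, false, false, false) := by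
    rw [hkeys, List.foldl_map]
    apply PySem.List.foldl_congr_mem
    intro acc p hp
    obtain ⟨k, v⟩ := p
    rw [PySem.Dict.getD_of_mem_items d hp hnd]
  rw [h1]
  have h2 : d.items.foldl (fun s p => one_primary_step s (PySem.Dict.ofList p.2)) (false, false, false, false, false, false)
      = (d.items.map (·.2)).foldl (fun s a => one_primary_step s (PySem.Dict.ofList a)) (false, false, false, false, false, false) := by
    rw [List.foldl_map]
  rw [h2, fold6, hvals]
  simp only [Bool.false_or]
  rfl
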